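-- pv_equiv track=rewrite | github.com/nourbenhassine1904/human-firewall | backend/app/rules.py | get_attack_type
-- ===== SOURCE A (Python) =====
-- def get_attack_type(text: str, prediction: str) -> str:
--     text_lower = text.lower()
--
--     if any(word in text_lower for word in ["bancaire", "bank", "compte", "account", "suspendu", "verify"]):
--         return "banking scam"
--
--     if any(word in text_lower for word in ["livraison", "colis", "adresse", "delivery"]):
--         return "delivery scam"
--
--     if any(word in text_lower for word in ["otp", "password", "mot de passe", "code"]):
--         return "credential theft"
--
--     if any(word in text_lower for word in ["urgent", "immédiatement", "locked", "blocked"]):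
--         return "urgency scam"
--
--     if prediction == "phishing":
--         return "generic phishing"
--
--     return "benign"
-- ===== SOURCE B (Python) =====
-- KEYWORD_RANK = {
--     "bancaire": 0, "bank": 0, "compte": 0, "account": 0, "suspendu": 0, "verify": 0,
--     "livraison": 1, "colis": 1, "adresse": 1, "delivery": 1,
--     "otp": 2, "password": 2, "mot de passe": 2, "code": 2,
--     "urgent": 3, "immédiatement": 3, "locked": 3, "blocked": 3,
-- }
-- LABELS = ["banking scam", "delivery scam", "credential theft", "urgency scam"]
--
--
-- def get_attack_type(text: str, prediction: str) -> str:
--     text_lower = text.lower()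
--     hits = [rank for kw, rank in KEYWORD_RANK.items() if kw in text_lower]
--     if hits:
--         return LABELS[min(hits)]
--     return "generic phishing" if prediction == "phishing" else "benign"
-- ===== Notes on version B (the rewrite author's own statement) =====
-- stated objective: alternative
-- what changed: Replaces the four ordered short-circuit any-blocks by a scoring pass: a flat keyword-to-rank map is scanned once collecting every matched rank, and the label of the minimum rank is returned (argmin), with the phishing/benign fallback when no keyword matches.
import Mathlib
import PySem

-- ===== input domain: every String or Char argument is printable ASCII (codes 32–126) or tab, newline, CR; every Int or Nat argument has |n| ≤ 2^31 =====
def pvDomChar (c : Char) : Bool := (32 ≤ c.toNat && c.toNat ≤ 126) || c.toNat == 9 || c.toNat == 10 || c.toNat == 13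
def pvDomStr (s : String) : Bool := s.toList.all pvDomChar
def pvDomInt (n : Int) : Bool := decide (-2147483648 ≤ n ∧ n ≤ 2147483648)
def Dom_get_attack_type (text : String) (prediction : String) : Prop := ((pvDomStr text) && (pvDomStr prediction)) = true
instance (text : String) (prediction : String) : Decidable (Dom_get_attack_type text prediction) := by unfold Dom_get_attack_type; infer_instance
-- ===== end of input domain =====

-- B replaces A's ordered short-circuit cascade by a scoring pass: one flat keyword→rank map,
-- collect every matched rank, and return the label of the minimum rank (argmin), with the
-- phishing/benign fallback when nothing matched. Alternative decomposition; same cost.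


-- ===== PORT A =====
def get_attack_type (text : String) (prediction : String) : String :=
  let text_lower := PySem.Str.lower text
  if ["bancaire", "bank", "compte", "account", "suspendu", "verify"].any
      (fun word => PySem.Str.isIn word text_lower) then "banking scam"
  else if ["livraison", "colis", "adresse", "delivery"].any
      (fun word => PySem.Str.isIn word text_lower) then "delivery scam"
  else if ["otp", "password", "mot de passe", "code"].any
      (fun word => PySem.Str.isIn word text_lower) then "credential theft"
  else if ["urgent", "immédiatement", "locked", "blocked"].any
      (fun word => PySem.Str.isIn word text_lower) then "urgency scam"
  else if prediction == "phishing" then "generic phishing"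
  else "benign"

-- ===== PORT B =====
-- KEYWORD_RANK dict (association list in insertion order; .items() order)
def pvKeywordRank : List (String × Int) :=
  [("bancaire", 0), ("bank", 0), ("compte", 0), ("account", 0), ("suspendu", 0), ("verify", 0),
   ("livraison", 1), ("colis", 1), ("adresse", 1), ("delivery", 1),
   ("otp", 2), ("password", 2), ("mot de passe", 2), ("code", 2),
   ("urgent", 3), ("immédiatement", 3), ("locked", 3), ("blocked", 3)]

def pvLabels : List String := ["banking scam", "delivery scam", "credential theft", "urgency scam"]

def get_attack_type_alt (text : String) (prediction : String) : String :=
  let text_lower := PySem.Str.lower text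
  let hits : List Int :=
    (pvKeywordRank.filter (fun p => PySem.Str.isIn p.1 text_lower)).map Prod.snd
  -- 'if hits: return LABELS[min(hits)]' — min(hits) exists iff hits is nonempty;
  -- LABELS[...] never raises since every rank is 0..3, so pyGetD's default is unreachable
  match PySem.List.min? hits (fun x => x) with
  | some m => PySem.List.pyGetD pvLabels m ""
  | none => if prediction == "phishing" then "generic phishing" else "benign"

-- ===== PRECONDITION & SPEC =====
def Spec_get_attack_type (text : String) (prediction : String) (out : String) : Prop := out = get_attack_type_alt text prediction
instance (text : String) (prediction : String) (out : String) : Decidable (Spec_get_attack_type text prediction out) := by unfold Spec_get_attack_type; infer_instance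

-- ===== CLAIM =====
def Claim_equal_get_attack_type : Prop := ∀ (text : String) (prediction : String), Dom_get_attack_type text prediction → Spec_get_attack_type text prediction (get_attack_type text prediction)

-- ===== LEMMAS AND PROOFS =====

-- the four keyword groups of A (proof-only names)
def pvG0 : List String := ["bancaire", "bank", "compte", "account", "suspendu", "verify"]
def pvG1 : List String := ["livraison", "colis", "adresse", "delivery"]
def pvG2 : List String := ["otp", "password", "mot de passe", "code"]
def pvG3 : List String := ["urgent", "immédiatement", "locked", "blocked"]

lemma pvKeywordRank_grouped :
    pvKeywordRank = pvG0.map (fun w => (w, (0 : Int))) ++ pvG1.map (fun w => (w, (1 : Int)))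
      ++ pvG2.map (fun w => (w, (2 : Int))) ++ pvG3.map (fun w => (w, (3 : Int))) := rfl

-- matched ranks of one group = that rank replicated (once per matched keyword)
lemma pv_hits_group (ws : List String) (r : Int) (tl : String) :
    (((ws.map (fun w => (w, r))).filter (fun p => PySem.Str.isIn p.1 tl)).map Prod.snd)
      = List.replicate ((ws.filter (fun w => PySem.Str.isIn w tl)).length) r := by
  simp only [PySem.Str.isIn]
  induction ws with
  | nil => rfl
  | cons w ws ih =>
      by_cases h : PySem.Chars.isIn w.toList tl.toList
      · simp [h, ih, List.replicate_succ]
      · simp [h, ih]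

-- min of a list whose head is a lower bound is the head
lemma pv_min?_cons_of_le (x : Int) (t : List Int) (h : ∀ y ∈ t, x ≤ y) :
    PySem.List.min? (x :: t) (fun y => y) = some x := by
  rw [PySem.List.min?_id_cons]
  congr 1
  induction t generalizing x with
  | nil => rfl
  | cons y t ih =>
      have hx : min x y = x := min_eq_left (h y (by simp))
      simp only [List.foldl_cons, hx]
      exact ih x (fun z hz => h z (by simp [hz]))

-- min over the replicate-concatenation picks the first nonempty group's rank
lemma pv_min_reps (n0 n1 n2 n3 : Nat) :
    PySem.List.min? (List.replicate n0 (0 : Int) ++ List.replicate n1 1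
        ++ List.replicate n2 2 ++ List.replicate n3 3) (fun x => x)
      = if n0 ≠ 0 then some 0 else if n1 ≠ 0 then some 1
        else if n2 ≠ 0 then some 2 else if n3 ≠ 0 then some 3 else none := by
  split_ifs with h0 h1 h2 h3
  · obtain ⟨k, rfl⟩ := Nat.exists_eq_succ_of_ne_zero h0
    rw [List.replicate_succ]
    simp only [List.cons_append]
    apply pv_min?_cons_of_le
    intro y hy
    simp [List.mem_append, List.mem_replicate] at hy
    omega
  · obtain ⟨k, rfl⟩ := Nat.exists_eq_succ_of_ne_zero h1
    have e0 : n0 = 0 := by omega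
    subst e0
    rw [List.replicate_succ]
    simp only [List.replicate_zero, List.nil_append]
    apply pv_min?_cons_of_le
    intro y hy
    simp [List.mem_append, List.mem_replicate] at hy
    omega
  · obtain ⟨k, rfl⟩ := Nat.exists_eq_succ_of_ne_zero h2
    have e0 : n0 = 0 := by omega
    have e1 : n1 = 0 := by omega
    subst e0; subst e1
    rw [List.replicate_succ]
    simp only [List.replicate_zero, List.nil_append]
    apply pv_min?_cons_of_le
    intro y hy
    simp [List.mem_append, List.mem_replicate] at hy
    omega
  · obtain ⟨k, rfl⟩ := Nat.exists_eq_succ_of_ne_zero h3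
    have e0 : n0 = 0 := by omega
    have e1 : n1 = 0 := by omega
    have e2 : n2 = 0 := by omega
    subst e0; subst e1; subst e2
    rw [List.replicate_succ]
    simp only [List.replicate_zero, List.nil_append]
    apply pv_min?_cons_of_le
    intro y hy
    simp [List.mem_replicate] at hy
    omega
  · have e0 : n0 = 0 := by omega
    have e1 : n1 = 0 := by omega
    have e2 : n2 = 0 := by omega
    have e3 : n3 = 0 := by omega
    subst e0; subst e1; subst e2; subst e3
    rfl

-- group-any ↔ nonzero match count
lemma pv_any_iff (ws : List String) (tl : String) :
    (ws.any (fun w => PySem.Str.isIn w tl) = true)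
      ↔ (ws.filter (fun w => PySem.Str.isIn w tl)).length ≠ 0 := by
  rw [List.any_eq_true]
  constructor
  · rintro ⟨w, hw, hin⟩ h
    rw [List.length_eq_zero_iff, List.filter_eq_nil_iff] at h
    exact absurd hin (by simpa using h w hw)
  · intro h
    by_contra hno
    apply h
    rw [List.length_eq_zero_iff, List.filter_eq_nil_iff]
    intro w hw hin
    exact hno ⟨w, hw, by simpa using hin⟩

-- ===== VERDICT =====
set_option maxHeartbeats 1000000 in
theorem get_attack_type_spec : Claim_equal_get_attack_type := by
  intro text prediction _
  unfold Spec_get_attack_type get_attack_type get_attack_type_alt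
  rw [pvKeywordRank_grouped]
  simp only [List.filter_append, List.map_append, pv_hits_group, pv_min_reps]
  have a0 := pv_any_iff pvG0 (PySem.Str.lower text)
  have a1 := pv_any_iff pvG1 (PySem.Str.lower text)
  have a2 := pv_any_iff pvG2 (PySem.Str.lower text)
  have a3 := pv_any_iff pvG3 (PySem.Str.lower text)
  have e0 : ["bancaire", "bank", "compte", "account", "suspendu", "verify"] = pvG0 := rfl
  have e1 : ["livraison", "colis", "adresse", "delivery"] = pvG1 := rfl
  have e2 : ["otp", "password", "mot de passe", "code"] = pvG2 := rfl
  have e3 : ["urgent", "immédiatement", "locked", "blocked"] = pvG3 := rfl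
  rw [e0, e1, e2, e3]
  by_cases h0 : (pvG0.filter (fun w => PySem.Str.isIn w (PySem.Str.lower text))).length = 0
  · by_cases h1 : (pvG1.filter (fun w => PySem.Str.isIn w (PySem.Str.lower text))).length = 0
    · by_cases h2 : (pvG2.filter (fun w => PySem.Str.isIn w (PySem.Str.lower text))).length = 0
      · by_cases h3 : (pvG3.filter (fun w => PySem.Str.isIn w (PySem.Str.lower text))).length = 0
        · rw [if_neg (fun h => a0.mp h h0), if_neg (fun h => a1.mp h h1),
              if_neg (fun h => a2.mp h h2), if_neg (fun h => a3.mp h h3),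
              if_neg (not_not_intro h0), if_neg (not_not_intro h1),
              if_neg (not_not_intro h2), if_neg (not_not_intro h3)]
        · rw [if_neg (fun h => a0.mp h h0), if_neg (fun h => a1.mp h h1),
              if_neg (fun h => a2.mp h h2), if_pos (a3.mpr h3),
              if_neg (not_not_intro h0), if_neg (not_not_intro h1),
              if_neg (not_not_intro h2), if_pos h3]
          rfl
      · rw [if_neg (fun h => a0.mp h h0), if_neg (fun h => a1.mp h h1),
            if_pos (a2.mpr h2),
            if_neg (not_not_intro h0), if_neg (not_not_intro h1), if_pos h2]
        rfl
    · rw [if_neg (fun h => a0.mp h h0), if_pos (a1.mpr h1),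
          if_neg (not_not_intro h0), if_pos h1]
      rfl
  · rw [if_pos (a0.mpr h0), if_pos h0]
    rfl
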